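-- pv_equiv track=rewrite | github.com/robert1948/autorisen | scripts/sync_playbooks_tracker.py | _bucket_rows
-- ===== SOURCE A (Python) =====
-- from collections import Counter, defaultdict
--
-- def _bucket_rows(rows: list[dict[str, str]]) -> dict[str, list[dict[str, str]]]:
--     buckets: dict[str, list[dict[str, str]]] = defaultdict(list)
--     for row in rows:
--         status = row.get("status", "").lower()
--         normalized = status or "todo"
--         if normalized not in {"completed", "in-progress", "doing", "todo", "planned", "recurring"}:
--             normalized = "todo"
--         buckets[normalized].append(row)
--     return buckets
-- ===== SOURCE B (Python) =====
-- def _bucket_rows(rows):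
--     allowed = {"completed", "in-progress", "doing", "todo", "planned", "recurring"}
--
--     def key(row):
--         status = row.get("status", "").lower() or "todo"
--         return status if status in allowed else "todo"
--
--     order = list(dict.fromkeys(key(r) for r in rows))
--     return {k: [r for r in rows if key(r) == k] for k in order}
-- ===== Notes on version B (the rewrite author's own statement) =====
-- stated objective: alternative
-- what changed: Replaces A's single-pass defaultdict-append loop by a two-pass decomposition: compute the normalized status key per row, take the first-occurrence-ordered distinct keys, and build each bucket with one filter pass per key.
import Mathlib
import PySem

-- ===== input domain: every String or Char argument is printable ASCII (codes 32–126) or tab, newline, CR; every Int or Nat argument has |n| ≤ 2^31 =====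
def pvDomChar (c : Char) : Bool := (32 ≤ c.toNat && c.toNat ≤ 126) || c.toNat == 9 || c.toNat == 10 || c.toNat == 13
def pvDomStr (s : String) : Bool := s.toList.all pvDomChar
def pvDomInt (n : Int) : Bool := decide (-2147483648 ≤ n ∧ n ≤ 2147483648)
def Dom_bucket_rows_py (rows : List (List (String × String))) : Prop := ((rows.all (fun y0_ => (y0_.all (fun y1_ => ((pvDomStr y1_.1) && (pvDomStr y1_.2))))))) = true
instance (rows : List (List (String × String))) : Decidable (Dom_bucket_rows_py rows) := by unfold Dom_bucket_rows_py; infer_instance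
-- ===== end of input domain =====

-- B replaces A's single-pass defaultdict-append loop by a two-pass decomposition (first-occurrence key order, then one filter per key); objective: alternative, not faster.

-- ===== PORT A =====
-- literal transliteration of _bucket_rows: a fold over rows appending each row to its bucket
def bucket_rows_py (rows : List (List (String × String))) : List (String × List (List (String × String))) :=
  (rows.foldl (fun (buckets : PySem.Dict String (List (List (String × String)))) row =>
      let status := PySem.Str.lower (PySem.Dict.getD ⟨row⟩ "status" "")
      let normalized := if status == "" then "todo" else status
      let normalized := if !(normalized == "completed" || normalized == "in-progress" || normalized == "doing" || normalized == "todo" || normalized == "planned" || normalized == "recurring") then "todo" else normalized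
      PySem.Dict.modify buckets normalized [] (· ++ [row]))
    PySem.Dict.empty).items

-- ===== PORT B =====
-- B's key function
def bucketKey (row : List (String × String)) : String :=
  let status := PySem.Str.lower (PySem.Dict.getD ⟨row⟩ "status" "")
  let status := if status == "" then "todo" else status
  if (status == "completed" || status == "in-progress" || status == "doing" || status == "todo" || status == "planned" || status == "recurring") then status else "todo"

def bucket_rows_py_alt (rows : List (List (String × String))) : List (String × List (List (String × String))) :=
  let order := PySem.List.dedup (rows.map bucketKey)
  order.map (fun k => (k, rows.filter (fun r => bucketKey r == k)))

-- ===== PRECONDITION & SPEC =====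
def Spec_bucket_rows_py (rows : List (List (String × String))) (out : List (String × List (List (String × String)))) : Prop := out = bucket_rows_py_alt rows
instance (rows : List (List (String × String))) (out : List (String × List (List (String × String)))) : Decidable (Spec_bucket_rows_py rows out) := by unfold Spec_bucket_rows_py; infer_instance

-- ===== CLAIM (what is proved, stated in full; the proofs are below) =====
def Claim_equal_bucket_rows_py : Prop := ∀ (rows : List (List (String × String))), Dom_bucket_rows_py rows → Spec_bucket_rows_py rows (bucket_rows_py rows)

-- ===== LEMMAS AND PROOFS =====

theorem pvIteNot {α : Type} (c : Bool) (a b : α) : (if !c then a else b) = if c then b else a := by cases c <;> rfl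

-- A's loop body is exactly "append row to the bucket of bucketKey row"
theorem stepA_eq :
    (fun (buckets : PySem.Dict String (List (List (String × String)))) row =>
      let status := PySem.Str.lower (PySem.Dict.getD ⟨row⟩ "status" "")
      let normalized := if status == "" then "todo" else status
      let normalized := if !(normalized == "completed" || normalized == "in-progress" || normalized == "doing" || normalized == "todo" || normalized == "planned" || normalized == "recurring") then "todo" else normalized
      PySem.Dict.modify buckets normalized [] (· ++ [row]))
    = fun buckets row => PySem.Dict.modify buckets (bucketKey row) [] (· ++ [row]) := by
  funext b r
  simp only [bucketKey, pvIteNot]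

-- ===== VERDICT (by name: the statement is the Claim_ definition above) =====
theorem bucket_rows_py_spec : Claim_equal_bucket_rows_py := by
  intro rows _
  unfold Spec_bucket_rows_py bucket_rows_py bucket_rows_py_alt
  rw [stepA_eq]
  have hnd : (rows.foldl (fun buckets row => PySem.Dict.modify buckets (bucketKey row) [] (· ++ [row])) PySem.Dict.empty).keys.Nodup := by
    exact PySem.Dict.nodup_keys_foldl_modify_key _ _ _ _ _ (by simp [PySem.Dict.keys_empty])
  rw [PySem.Dict.items_eq_map_keys _ hnd []]
  have hkeys : (rows.foldl (fun buckets row => PySem.Dict.modify buckets (bucketKey row) [] (· ++ [row])) PySem.Dict.empty).keys = PySem.List.dedup (rows.map bucketKey) := by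
    rw [PySem.Dict.keys_foldl_modify_key]
    simp [PySem.Dict.keys_empty, PySem.Set.update_nil_left]
  have hget : ∀ k, (rows.foldl (fun buckets row => PySem.Dict.modify buckets (bucketKey row) [] (· ++ [row])) PySem.Dict.empty).getD k [] = rows.filter (fun r => bucketKey r == k) := by
    intro k
    have h := PySem.Dict.getD_foldl_modify_append (l := rows.map (fun r => (bucketKey r, r))) (d := PySem.Dict.empty) (c := k)
    rw [List.foldl_map] at h
    simpa [List.filter_map, Function.comp_def, PySem.Dict.getD_empty, List.map_id] using h
  rw [hkeys]
  exact List.map_congr_left (fun k _ => by rw [hget k])
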